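-- pv_equiv track=rewrite | github.com/loupdaniel/cs-111 | past_assignments/excercises/CLee_cs111_ex17.py | repeats
-- ===== SOURCE A (Python) =====
-- def repeats(text):
--     """Finds all consecutive repeated substrings in the given text.
--
--     Parameters:
--         text: The input string.
--
--     Return values:
--         result: A list of substrings that are repeated consecutively.
--     """
--     result = []
--     n = len(text)
--
--     for i in range(n):
--         maxLenSub = (n - i) // 2
--
--         for lenSub in range(1, maxLenSub + 1):
--             firstSub = text[i:i + lenSub]
--             secondSub = text[i + lenSub:i + 2 * lenSub]
--
--             if firstSub == secondSub and firstSub not in result: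
--                 result.append(firstSub)
--
--     return result
-- ===== SOURCE B (Python) =====
-- def repeats(text):
--     """Finds all consecutive repeated substrings in the given text (same order as A),
--     using an O(n^2) longest-common-prefix DP instead of O(n^3) substring comparisons."""
--     n = len(text)
--     # lcp[i][j] = length of the longest common prefix of text[i:] and text[j:]
--     lcp = [[0] * (n + 1)]
--     for i in range(n - 1, -1, -1):
--         prev = lcp[0]
--         row = [prev[j + 1] + 1 if text[i] == text[j] else 0 for j in range(n)] + [0]
--         lcp.insert(0, row)
--     result = []
--     seen = set()
--     for i in range(n):
--         row = lcp[i]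
--         for lenSub in range(1, (n - i) // 2 + 1):
--             if row[i + lenSub] >= lenSub:
--                 sub = text[i:i + lenSub]
--                 if sub not in seen:
--                     seen.add(sub)
--                     result.append(sub)
--     return result
-- ===== Notes on version B (the rewrite author's own statement) =====
-- stated objective: faster
-- what changed: Replaces A's per-pair substring slicing-and-comparison (O(n^3) character work) and list membership scan by an O(n^2) longest-common-prefix DP table giving O(1) repeat tests, with a seen-set for order-preserving dedupe.
import Mathlib
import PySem

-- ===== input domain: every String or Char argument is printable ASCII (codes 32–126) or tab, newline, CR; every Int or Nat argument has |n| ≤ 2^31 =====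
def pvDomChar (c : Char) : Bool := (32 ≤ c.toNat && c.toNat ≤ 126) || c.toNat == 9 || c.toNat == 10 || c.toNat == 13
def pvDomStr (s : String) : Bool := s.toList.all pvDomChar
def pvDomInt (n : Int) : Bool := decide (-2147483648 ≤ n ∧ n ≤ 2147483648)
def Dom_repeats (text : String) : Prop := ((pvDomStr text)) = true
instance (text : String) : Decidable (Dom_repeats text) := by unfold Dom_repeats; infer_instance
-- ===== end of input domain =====

-- B replaces A's O(n^3) slice-and-compare double loop by an O(n^2) longest-common-prefix DP
-- table (O(1) repeat test per position/length) plus a seen-set for order-preserving dedupe.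

-- ===== PORT A =====
def repeats (text : String) : List String :=
  let n : Int := PySem.Str.len text
  (PySem.List.pyRange 0 n 1).foldl (fun result i =>
    let maxLenSub := PySem.Int.floordiv (n - i) 2
    (PySem.List.pyRange 1 (maxLenSub + 1) 1).foldl (fun result lenSub =>
      let firstSub := PySem.Str.slice text (some i) (some (i + lenSub))
      let secondSub := PySem.Str.slice text (some (i + lenSub)) (some (i + 2 * lenSub))
      if firstSub == secondSub && !(result.contains firstSub) then result ++ [firstSub]
      else result) result) []

-- ===== PORT B =====
-- one DP row: [prev[j+1] + 1 if text[i] == text[j] else 0 for j in range(n)] + [0]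
def altRow (text : String) (prev : List Int) (i : Int) : List Int :=
  ((PySem.List.pyRange 0 (PySem.Str.len text) 1).map (fun j =>
    if PySem.Str.pyGet? text i == PySem.Str.pyGet? text j
    then PySem.List.pyGetD prev (j + 1) 0 + 1 else 0)) ++ [0]

-- the table: lcp[i][j] = longest common prefix of text[i:] and text[j:], built backwards
def altRows (text : String) : List (List Int) :=
  (PySem.List.pyRange (PySem.Str.len text - 1) (-1) (-1)).foldl (fun lcp i =>
    let prev := PySem.List.pyGetD lcp 0 []
    PySem.List.insert lcp 0 (altRow text prev i))
    [List.replicate ((PySem.Str.len text).toNat + 1) 0]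

def repeats_alt (text : String) : List String :=
  let n : Int := PySem.Str.len text
  let lcp := altRows text
  ((PySem.List.pyRange 0 n 1).foldl (fun st i =>
    let row := PySem.List.pyGetD lcp i []
    (PySem.List.pyRange 1 (PySem.Int.floordiv (n - i) 2 + 1) 1).foldl (fun st lenSub =>
      if PySem.List.pyGetD row (i + lenSub) 0 ≥ lenSub then
        let sub := PySem.Str.slice text (some i) (some (i + lenSub))
        if !(PySem.Set.contains st.2 sub) then (st.1 ++ [sub], PySem.Set.add st.2 sub)
        else st
      else st) st) (([], PySem.Set.empty) : List String × PySem.Set String)).1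

-- ===== PRECONDITION & SPEC =====
def Spec_repeats (text : String) (out : List String) : Prop := out = repeats_alt text
instance (text : String) (out : List String) : Decidable (Spec_repeats text out) := by unfold Spec_repeats; infer_instance

-- ===== CLAIM (what is proved, stated in full; the proofs are below) =====
def Claim_equal_repeats : Prop := ∀ (text : String), Dom_repeats text → Spec_repeats text (repeats text)

-- ===== LEMMAS AND PROOFS =====

-- recursive longest-common-prefix: the mathematical meaning of B's DP table
def lcpR : List Char → List Char → Int
  | a :: xs, b :: ys => if a = b then lcpR xs ys + 1 else 0
  | _, _ => 0

lemma lcpR_nil_right (xs : List Char) : lcpR xs [] = 0 := by cases xs <;> simp [lcpR]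

lemma lcpR_nil_left (ys : List Char) : lcpR [] ys = 0 := by cases ys <;> simp [lcpR]

-- the intended i-th row of the DP table
def specRow (cs : List Char) (i : Nat) : List Int :=
  (List.range cs.length).map (fun j => lcpR (cs.drop i) (cs.drop j)) ++ [0]

lemma length_specRow (cs : List Char) (i : Nat) : (specRow cs i).length = cs.length + 1 := by
  simp [specRow]

lemma specRow_last (cs : List Char) :
    specRow cs cs.length = List.replicate (cs.length + 1) 0 := by
  simp [specRow, lcpR_nil_left, List.replicate_succ']

lemma lcpR_drop (cs : List Char) (m j : Nat) (hm : m < cs.length) (hj : j < cs.length) :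
    lcpR (cs.drop m) (cs.drop j)
      = if cs[m] = cs[j] then lcpR (cs.drop (m + 1)) (cs.drop (j + 1)) + 1 else 0 := by
  conv_lhs => rw [← List.getElem_cons_drop hm, ← List.getElem_cons_drop hj]
  simp [lcpR]

lemma specRow_get (cs : List Char) (i k : Nat) (hk : k ≤ cs.length) :
    PySem.List.pyGetD (specRow cs i) ((k : Int)) 0 = lcpR (cs.drop i) (cs.drop k) := by
  rw [PySem.List.pyGetD_eq_getElem _ _ _ (by rw [length_specRow]; push_cast; omega)]
  rcases Nat.lt_or_ge k cs.length with h | h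
  · simp only [Int.toNat_natCast, specRow]
    rw [List.getElem_append_left (by simpa using h)]
    simp
  · have hk' : k = cs.length := le_antisymm hk h
    subst hk'
    simp only [Int.toNat_natCast, specRow]
    rw [List.getElem_append_right (by simp)]
    simp [lcpR_nil_right]
  · omega

lemma altRow_spec (text : String) (m : Nat) (hm : m < text.toList.length) :
    altRow text (specRow text.toList (m + 1)) ((m : Int)) = specRow text.toList m := by
  unfold altRow
  conv_rhs => rw [specRow]
  have hlen : PySem.Str.len text = (text.toList.length : Int) := by simp
  rw [hlen, PySem.List.pyRange_one]
  simp only [sub_zero, Int.toNat_natCast, List.map_map]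
  congr 1
  apply List.map_congr_left
  intro j hj
  have hj' : j < text.toList.length := List.mem_range.mp hj
  simp only [Function.comp_apply, zero_add]
  simp only [PySem.Str.pyGet?_natCast]
  rw [List.getElem?_eq_getElem hm, List.getElem?_eq_getElem hj']
  have : ((j : Int) + 1) = ((j + 1 : Nat) : Int) := by push_cast; ring
  rw [this, specRow_get _ _ _ (by omega), lcpR_drop _ _ _ hm hj']
  by_cases he : text.toList[m] = text.toList[j] <;> simp [he]

lemma altRows_aux (text : String) : ∀ (m : Nat), m ≤ text.toList.length →
    (PySem.List.pyRange ((m : Int) - 1) (-1) (-1)).foldl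
      (fun lcp i => PySem.List.insert lcp 0 (altRow text (PySem.List.pyGetD lcp 0 []) i))
      ((List.range (text.toList.length + 1 - m)).map (fun k => specRow text.toList (m + k)))
    = (List.range (text.toList.length + 1)).map (specRow text.toList) := by
  intro m
  induction m with
  | zero =>
    intro _
    rw [PySem.List.pyRange_neg_one_eq_nil (by omega)]
    simp
  | succ m ih =>
    intro hm
    rw [show (((m + 1 : Nat) : Int) - 1) = (m : Int) by push_cast; ring,
        PySem.List.pyRange_neg_one_cons (by omega), List.foldl_cons]
    have hl1 : text.toList.length + 1 - (m + 1) = text.toList.length - m := by omega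
    rw [hl1]
    have hprev : PySem.List.pyGetD
        ((List.range (text.toList.length - m)).map (fun k => specRow text.toList (m + 1 + k)))
        0 [] = specRow text.toList (m + 1) := by
      rw [PySem.List.pyGetD_eq_getElem _ _ _ (by simp only [List.length_map, List.length_range]; omega)]
      · simp
      · norm_num
    rw [hprev, PySem.List.insert_zero, altRow_spec text m (by omega)]
    have hstate :
        specRow text.toList m ::
          (List.range (text.toList.length - m)).map (fun k => specRow text.toList (m + 1 + k))
        = (List.range (text.toList.length + 1 - m)).map (fun k => specRow text.toList (m + k)) := by
      rw [show text.toList.length + 1 - m = (text.toList.length - m) + 1 by omega,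
          List.range_succ_eq_map]
      simp only [List.map_cons, Nat.add_zero, List.map_map]
      congr 1
      apply List.map_congr_left
      intro k _
      simp only [Function.comp_apply]
      congr 1
      omega
    rw [hstate]
    exact ih (by omega)

lemma altRows_spec (text : String) :
    altRows text = (List.range (text.toList.length + 1)).map (specRow text.toList) := by
  unfold altRows
  have hlen : PySem.Str.len text = (text.toList.length : Int) := by simp
  rw [hlen]
  have hinit : [List.replicate (((text.toList.length : Int)).toNat + 1) 0]
      = (List.range (text.toList.length + 1 - text.toList.length)).map
          (fun k => specRow text.toList (text.toList.length + k)) := by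
    rw [show text.toList.length + 1 - text.toList.length = 1 from by omega, List.range_one]
    simp only [List.map_cons, List.map_nil, Nat.add_zero, Int.toNat_natCast]
    rw [specRow_last]
  rw [hinit]
  exact altRows_aux text text.toList.length le_rfl

lemma lcpR_nonneg : ∀ (xs ys : List Char), 0 ≤ lcpR xs ys
  | a :: xs, b :: ys => by
      simp only [lcpR]; split_ifs with h
      · have := lcpR_nonneg xs ys; omega
      · omega
  | [], _ => by simp [lcpR_nil_left]
  | _ :: _, [] => by simp [lcpR_nil_right]

lemma lcpR_take : ∀ (L : Nat) (xs ys : List Char), L ≤ ys.length →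
    (((L : Int) ≤ lcpR xs ys) ↔ xs.take L = ys.take L)
  | 0, xs, ys, _ => by simpa using lcpR_nonneg xs ys
  | L + 1, xs, ys, h => by
    match ys, xs with
    | [], _ => simp at h
    | b :: ys, [] =>
      simp only [lcpR, List.take_nil, List.take_succ_cons]
      constructor
      · intro hle; omega
      · intro he; exact absurd he (by simp)
    | b :: ys, a :: xs =>
      simp only [lcpR, List.take_succ_cons]
      split_ifs with hab
      · subst hab
        have ih := lcpR_take L xs ys (by simpa using h)
        constructor
        · intro hle
          simp only [List.cons.injEq, true_and]
          exact ih.mp (by push_cast at hle ⊢; omega)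
        · intro he
          simp only [List.cons.injEq, true_and] at he
          have := ih.mpr he
          push_cast at this ⊢; omega
      · constructor
        · intro hle; omega
        · intro he; exact absurd (List.cons.inj he).1 hab

lemma cond_iff (text : String) (i L : Nat) (hL : 1 ≤ L) (h : i + 2 * L ≤ text.toList.length) :
    (PySem.Str.slice text (some (i : Int)) (some ((i : Int) + (L : Int)))
       = PySem.Str.slice text (some ((i : Int) + (L : Int))) (some ((i : Int) + 2 * (L : Int))))
    ↔ ((L : Int) ≤ PySem.List.pyGetD (specRow text.toList i) ((i : Int) + (L : Int)) 0) := by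
  rw [show (i : Int) + (L : Int) = ((i + L : Nat) : Int) from by push_cast; ring,
      specRow_get _ _ _ (by omega),
      lcpR_take L _ _ (by rw [List.length_drop]; omega),
      ← String.toList_inj, PySem.Str.toList_slice, PySem.Str.toList_slice,
      PySem.Chars.slice_eq_listSlice, PySem.Chars.slice_eq_listSlice,
      show (i : Int) + 2 * (L : Int) = ((i + 2 * L : Nat) : Int) from by push_cast; ring,
      PySem.List.slice_natCast, PySem.List.slice_natCast,
      show i + L - i = L from by omega,
      show i + 2 * L - (i + L) = L from by omega]

lemma foldl_rel {A S T : Type} (R : S → T → Prop) (f : S → A → S) (g : T → A → T) :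
    ∀ (l : List A) (s : S) (t : T), R s t →
      (∀ x ∈ l, ∀ s' t', R s' t' → R (f s' x) (g t' x)) →
      R (l.foldl f s) (l.foldl g t) := by
  intro l
  induction l with
  | nil => intro s t h _; simpa using h
  | cons x xs ih =>
      intro s t h hstep
      simp only [List.foldl_cons]
      exact ih _ _ (hstep x (by simp) _ _ h) (fun y hy => hstep y (by simp [hy]))

lemma two_mul_floordiv_le (a : Int) : 2 * PySem.Int.floordiv a 2 ≤ a := by
  simp only [PySem.Int.floordiv, Int.fdiv_eq_ediv]
  omega

lemma main_eq (text : String) : repeats text = repeats_alt text := by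
  unfold repeats repeats_alt
  simp only []
  refine ((foldl_rel
    (fun (r : List String) (t : List String × List String) => t.1 = r ∧ t.2 = r)
    _ _ _
    [] (([], PySem.Set.empty) : List String × PySem.Set String)
    ⟨rfl, rfl⟩ ?_).1).symm
  intro i hi r t ht
  have hi' := (PySem.List.mem_pyRange_one).mp hi
  have hlen : PySem.Str.len text = (text.toList.length : Int) := by simp
  rw [hlen] at hi'
  obtain ⟨hi0, hin⟩ := hi'
  set iN := i.toNat with hiN
  have hieq : i = (iN : Int) := by omega
  have hiNlt : iN < text.toList.length := by omega
  -- the row B reads is specRow iN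
  have hrow : PySem.List.pyGetD (altRows text) i [] = specRow text.toList iN := by
    rw [altRows_spec, hieq, PySem.List.pyGetD_eq_getElem _ _ _
        (by simp only [List.length_map, List.length_range]; push_cast; omega)]
    · simp only [Int.toNat_natCast]
      rw [List.getElem_map, List.getElem_range]
    · omega
  rw [hrow]
  refine foldl_rel
    (fun (r : List String) (t : List String × List String) => t.1 = r ∧ t.2 = r)
    _ _ _ r t ht ?_
  intro L hL s' t' hst
  have hL' := (PySem.List.mem_pyRange_one).mp hL
  obtain ⟨hL1, hL2⟩ := hL'
  have hdiv : 2 * L ≤ PySem.Str.len text - i := by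
    have := two_mul_floordiv_le (PySem.Str.len text - i)
    omega
  rw [hlen] at hdiv
  set LN := L.toNat with hLN
  have hLeq : L = (LN : Int) := by omega
  have hbound : iN + 2 * LN ≤ text.toList.length := by omega
  have hcond := cond_iff text iN LN (by omega) hbound
  rw [hieq, hLeq]
  rcases t' with ⟨t1, t2⟩
  obtain ⟨h1, h2⟩ := hst
  dsimp only at h1 h2
  subst h1
  subst h2
  by_cases hc : ((LN : Int) ≤ PySem.List.pyGetD (specRow text.toList iN) ((iN : Int) + (LN : Int)) 0)
  · have hsub : PySem.Str.slice text (some (iN : Int)) (some ((iN : Int) + (LN : Int)))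
        = PySem.Str.slice text (some ((iN : Int) + (LN : Int))) (some ((iN : Int) + 2 * (LN : Int))) :=
      hcond.mpr hc
    rw [if_pos hc]
    have hbeq : (PySem.Str.slice text (some (iN : Int)) (some ((iN : Int) + (LN : Int)))
        == PySem.Str.slice text (some ((iN : Int) + (LN : Int))) (some ((iN : Int) + 2 * (LN : Int)))) = true := by
      simpa using hsub
    rw [hbeq]
    by_cases hmem : (PySem.Str.slice text (some (iN : Int)) (some ((iN : Int) + (LN : Int)))) ∈ t2
    · simp [hmem]
    · simp [hmem, PySem.Set.add, PySem.Set.contains]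
  · rw [if_neg hc]
    have hne : (PySem.Str.slice text (some (iN : Int)) (some ((iN : Int) + (LN : Int)))
        == PySem.Str.slice text (some ((iN : Int) + (LN : Int))) (some ((iN : Int) + 2 * (LN : Int)))) = false := by
      rw [beq_eq_false_iff_ne]
      intro hcontra
      exact hc (hcond.mp hcontra)
    rw [hne]
    simp

-- ===== VERDICT (by name: the statement is the Claim_ definition above) =====
theorem repeats_spec : Claim_equal_repeats := by
  intro text _
  unfold Spec_repeats
  exact main_eq text
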